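-- pv_equiv track=rewrite | github.com/Signalpilot/signalpilot-education-hub | fix_all_checkpoints.py | get_content_boundaries
-- ===== SOURCE A (Python) =====
-- def get_content_boundaries(lines):
--     """
--     Find the actual content boundaries.
--     Start: After header/TL;DR section
--     End: Before footer/navigation
--     """
--     start_line = 0
--     end_line = len(lines) - 1
--
--     # Find start (after TL;DR or first H2)
--     for i, line in enumerate(lines):
--         if '<h2>' in line or '<h2 ' in line:
--             start_line = i
--             break
--
--     # Find end (before nav-article or Test Your Knowledge)
--     for i in range(len(lines) - 1, 0, -1):
--         if 'nav-article' in lines[i] or 'Test Your Knowledge' in lines[i]: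
--             end_line = i
--             break
--
--     return start_line, end_line
-- ===== SOURCE B (Python) =====
-- def get_content_boundaries(lines):
--     """Single forward pass: the first H2 line sets the start; every end-marker
--     line with index >= 1 overwrites the end, so the highest match wins."""
--     start_line = 0
--     end_line = len(lines) - 1
--     found_start = False
--     for i, line in enumerate(lines):
--         if not found_start and ('<h2>' in line or '<h2 ' in line):
--             start_line = i
--             found_start = True
--         if i >= 1 and ('nav-article' in line or 'Test Your Knowledge' in line):
--             end_line = i
--     return start_line, end_line
-- ===== Notes on version B (the rewrite author's own statement) =====
-- stated objective: alternative
-- what changed: Replaces A's two separate scans (a forward first-match scan for the start and a backward first-match scan over range(len-1,0,-1) for the end) with one forward pass over enumerate(lines) that latches the first H2 index and keeps overwriting the end index on every marker line with i >= 1.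
import Mathlib
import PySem

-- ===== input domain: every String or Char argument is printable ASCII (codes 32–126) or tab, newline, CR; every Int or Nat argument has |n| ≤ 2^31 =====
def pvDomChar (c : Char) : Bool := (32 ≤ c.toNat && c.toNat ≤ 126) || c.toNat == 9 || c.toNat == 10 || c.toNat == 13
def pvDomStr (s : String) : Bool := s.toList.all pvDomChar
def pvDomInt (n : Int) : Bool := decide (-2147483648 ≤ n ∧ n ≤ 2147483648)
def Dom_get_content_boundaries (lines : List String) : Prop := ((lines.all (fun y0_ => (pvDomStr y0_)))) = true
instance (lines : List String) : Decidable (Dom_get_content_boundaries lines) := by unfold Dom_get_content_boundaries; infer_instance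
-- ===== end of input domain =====

-- B replaces A's two separate scans (forward for the start, backward for the end) by a
-- single forward pass over enumerate(lines); same cost, different decomposition.

-- ===== PORT A =====
-- first forward scan with break: first index whose line contains an H2 marker, else default
def pvFindStartA : List (Int × String) → Int → Int
  | [], d => d
  | (i, line) :: rest, d =>
    if PySem.Str.isIn "<h2>" line || PySem.Str.isIn "<h2 " line then i
    else pvFindStartA rest d

-- backward scan with break: first index in the countdown range whose line has an end marker
def pvFindEndA (lines : List String) : List Int → Int → Int
  | [], d => d
  | i :: rest, d =>
    if PySem.Str.isIn "nav-article" (PySem.List.pyGetD lines i "")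
        || PySem.Str.isIn "Test Your Knowledge" (PySem.List.pyGetD lines i "") then i
    else pvFindEndA lines rest d

def get_content_boundaries (lines : List String) : Int × Int :=
  let start_line := pvFindStartA (PySem.List.enumerate lines 0) 0
  let end_line := pvFindEndA lines
      (PySem.List.pyRange ((lines.length : Int) - 1) 0 (-1)) ((lines.length : Int) - 1)
  (start_line, end_line)

-- ===== PORT B =====
-- one loop body: (found_start, start_line, end_line) updated per (i, line)
def pvStepB (st : Bool × Int × Int) (p : Int × String) : Bool × Int × Int :=
  let s1 : Bool × Int :=
    if !st.1 && (PySem.Str.isIn "<h2>" p.2 || PySem.Str.isIn "<h2 " p.2)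
    then (true, p.1) else (st.1, st.2.1)
  let e1 : Int :=
    if decide (1 ≤ p.1) && (PySem.Str.isIn "nav-article" p.2 || PySem.Str.isIn "Test Your Knowledge" p.2)
    then p.1 else st.2.2
  (s1.1, s1.2, e1)

def get_content_boundaries_alt (lines : List String) : Int × Int :=
  let st := (PySem.List.enumerate lines 0).foldl pvStepB (false, 0, (lines.length : Int) - 1)
  (st.2.1, st.2.2)

-- ===== PRECONDITION & SPEC =====
def Spec_get_content_boundaries (lines : List String) (out : Int × Int) : Prop := out = get_content_boundaries_alt lines
instance (lines : List String) (out : Int × Int) : Decidable (Spec_get_content_boundaries lines out) := by unfold Spec_get_content_boundaries; infer_instance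

-- ===== CLAIM (what is proved, stated in full; the proofs are below) =====
def Claim_equal_get_content_boundaries : Prop := ∀ (lines : List String), Dom_get_content_boundaries lines → Spec_get_content_boundaries lines (get_content_boundaries lines)

-- ===== LEMMAS AND PROOFS =====

-- the two independent components of pvStepB
def pvStepS (st : Bool × Int) (p : Int × String) : Bool × Int :=
  if !st.1 && (PySem.Str.isIn "<h2>" p.2 || PySem.Str.isIn "<h2 " p.2) then (true, p.1) else st

def pvStepE (e : Int) (p : Int × String) : Int :=
  if decide (1 ≤ p.1) && (PySem.Str.isIn "nav-article" p.2 || PySem.Str.isIn "Test Your Knowledge" p.2)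
  then p.1 else e

theorem pvFoldB_decomp (l : List (Int × String)) : ∀ (f : Bool) (s e : Int),
    l.foldl pvStepB (f, s, e) = ((l.foldl pvStepS (f, s)).1, (l.foldl pvStepS (f, s)).2, l.foldl pvStepE e) := by
  induction l with
  | nil => intro f s e; rfl
  | cons p rest ih =>
    intro f s e
    simp only [List.foldl_cons]
    rw [show pvStepB (f, s, e) p = ((pvStepS (f, s) p).1, (pvStepS (f, s) p).2, pvStepE e p) by
      cases hb : (!f && (PySem.Str.isIn "<h2>" p.2 || PySem.Str.isIn "<h2 " p.2)) <;>
        simp only [pvStepB, pvStepS, pvStepE, hb]]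
    exact ih _ _ _

theorem pvFoldS_found (l : List (Int × String)) : ∀ (s : Int), l.foldl pvStepS (true, s) = (true, s) := by
  induction l with
  | nil => intro s; rfl
  | cons p rest ih => intro s; simp [List.foldl_cons, pvStepS, ih]

theorem pvFoldS_eq_findStart (l : List (Int × String)) : ∀ (d : Int),
    (l.foldl pvStepS (false, d)).2 = pvFindStartA l d := by
  induction l with
  | nil => intro d; rfl
  | cons p rest ih =>
    intro d
    obtain ⟨i, line⟩ := p
    simp only [List.foldl_cons, pvStepS, pvFindStartA, Bool.not_false, Bool.true_and]
    cases hb : (PySem.Str.isIn "<h2>" line || PySem.Str.isIn "<h2 " line)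
    · simpa using ih d
    · simpa using congrArg Prod.snd (pvFoldS_found rest i)

-- generic first-match on a list of indices
def pvFF (q : Int → Bool) : List Int → Int → Int
  | [], d => d
  | i :: rest, d => if q i then i else pvFF q rest d

theorem pvFF_append_singleton (q : Int → Bool) (l : List Int) : ∀ (x d : Int),
    pvFF q (l ++ [x]) d = pvFF q l (if q x then x else d) := by
  induction l with
  | nil => intro x d; rfl
  | cons i rest ih => intro x d; simp only [List.cons_append, pvFF]; rw [ih]

theorem pvFoldl_eq_FF_reverse (q : Int → Bool) (l : List Int) : ∀ (d : Int),
    l.foldl (fun e i => if q i then i else e) d = pvFF q l.reverse d := by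
  induction l with
  | nil => intro d; rfl
  | cons i rest ih =>
    intro d
    simp only [List.foldl_cons, List.reverse_cons]
    rw [pvFF_append_singleton, ih]

theorem pvFF_congr (q q' : Int → Bool) (l : List Int) (h : ∀ i ∈ l, q i = q' i) : ∀ (d : Int),
    pvFF q l d = pvFF q' l d := by
  induction l with
  | nil => intro d; rfl
  | cons i rest ih =>
    intro d
    simp only [pvFF, h i (List.mem_cons_self ..)]
    split
    · rfl
    · exact ih (fun j hj => h j (List.mem_cons_of_mem _ hj)) d

theorem pvFindEndA_eq_FF (lines : List String) (l : List Int) : ∀ (d : Int),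
    pvFindEndA lines l d =
      pvFF (fun i => PySem.Str.isIn "nav-article" (PySem.List.pyGetD lines i "")
            || PySem.Str.isIn "Test Your Knowledge" (PySem.List.pyGetD lines i "")) l d := by
  induction l with
  | nil => intro d; rfl
  | cons i rest ih => intro d; simp only [pvFindEndA, pvFF, ih]

-- ===== VERDICT (by name: the statement is the Claim_ definition above) =====
theorem get_content_boundaries_spec : Claim_equal_get_content_boundaries := by
  intro lines _
  unfold Spec_get_content_boundaries get_content_boundaries get_content_boundaries_alt
  rw [pvFoldB_decomp]
  refine Prod.ext ?_ ?_
  · -- start component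
    simpa using (pvFoldS_eq_findStart (PySem.List.enumerate lines 0) 0).symm
  · -- end component
    show pvFindEndA lines (PySem.List.pyRange ((lines.length : Int) - 1) 0 (-1)) ((lines.length : Int) - 1)
        = (PySem.List.enumerate lines 0).foldl pvStepE ((lines.length : Int) - 1)
    rw [PySem.List.enumerate_eq_map_pyRange lines ""]
    simp only [PySem.List.len_eq]
    rw [List.foldl_map]
    simp only [pvStepE]
    rw [pvFoldl_eq_FF_reverse (fun j => decide (1 ≤ j) &&
        (PySem.Str.isIn "nav-article" (PySem.List.pyGetD lines j "")
          || PySem.Str.isIn "Test Your Knowledge" (PySem.List.pyGetD lines j "")))]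
    rw [pvFindEndA_eq_FF]
    rcases Nat.eq_zero_or_pos lines.length with h0 | hpos
    · have hln : (lines.length : Int) = 0 := by simp [h0]
      rw [hln]
      rw [show PySem.List.pyRange ((0:Int)-1) 0 (-1) = [] from
        PySem.List.pyRange_neg_one_eq_nil (by norm_num)]
      rw [show PySem.List.pyRange (0:Int) 0 1 = [] from
        PySem.List.pyRange_one_eq_nil le_rfl]
      rfl
    · have h1 : (1 : Int) ≤ (lines.length : Int) := by exact_mod_cast hpos
      rw [show PySem.List.pyRange ((lines.length : Int) - 1) 0 (-1)
            = (PySem.List.pyRange 1 (lines.length : Int) 1).reverse by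
          rw [PySem.List.pyRange_neg_one_eq_reverse]; norm_num]
      rw [show PySem.List.pyRange 0 (lines.length : Int) 1
            = PySem.List.pyRange 0 1 1 ++ PySem.List.pyRange 1 (lines.length : Int) 1 from
          PySem.List.pyRange_one_append 0 1 (lines.length : Int) (by norm_num) h1]
      rw [show PySem.List.pyRange (0:Int) 1 1 = [0] from PySem.List.pyRange_one_singleton 0]
      simp only [List.reverse_cons, List.singleton_append]
      rw [pvFF_append_singleton, if_neg (by simp)]
      refine (pvFF_congr _ _ _ (fun i hi => ?_) _).symm
      have hge : (1 : Int) ≤ i := by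
        rw [List.mem_reverse, PySem.List.mem_pyRange_one] at hi
        exact hi.1
      simp [hge]
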